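-- pv_equiv track=rewrite | github.com/josalvatorre/practice-questions | underscorify_substring.py | underscorify_substring
-- ===== SOURCE A (Python) =====
-- def underscorify_substring(string, substring):
--     start_end_pairs = tuple(
--         (start, end)
--         for start in range(len(string))
--         if substring == string[start: (end := start + len(substring))]
--     )
--
--     underscore_indices = []
--     i = 0
--     while i < len(start_end_pairs):
--
--         start, end = start_end_pairs[i]
--
--         last_used_j = None
--         # start with the next pair
--         j = i + 1
--         while j < len(start_end_pairs):
--             start_prime, end_prime = start_end_pairs[j]
--             # start_prime == end would mean: testtest
--             # Let's collapse these two instances.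
--             if start_prime <= end:
--                 end = end_prime
--                 last_used_j = j
--             j += 1
--         underscore_indices.extend((start, end))
--         i = i + 1 if last_used_j is None else last_used_j + 1
--         pass
--
--     u = 0
--     result = []
--     for i in range(len(string)):
--         if u < len(underscore_indices) and i == underscore_indices[u]:
--             result.append('_')
--             u += 1
--         result.append(string[i])
--
--     if u < len(underscore_indices):
--         result.append('_')
--
--     return ''.join(result)
-- ===== SOURCE B (Python) =====
-- def underscorify_substring(string, substring):
--     m = len(substring)
--     # collect all occurrence starts with str.find (overlaps included)
--     starts = []
--     pos = string.find(substring)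
--     while pos != -1:
--         starts.append(pos)
--         pos = string.find(substring, pos + 1)
--     # single linear pass: merge touching/overlapping runs and emit slices
--     out = []
--     prev = 0
--     i = 0
--     n = len(starts)
--     while i < n:
--         s = starts[i]
--         e = s + m
--         i += 1
--         while i < n and starts[i] <= e:
--             e = starts[i] + m
--             i += 1
--         out.append(string[prev:s])
--         out.append('_')
--         out.append(string[s:e])
--         out.append('_')
--         prev = e
--     out.append(string[prev:])
--     return ''.join(out)
-- ===== Notes on version B (the rewrite author's own statement) =====
-- stated objective: faster
-- what changed: Replaces A's quadratic pairwise merge and char-by-char emission with str.find occurrence search, a single linear merge pass over the sorted starts, and slice concatenation.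
-- outside the precondition, e.g. on underscorify_substring('abc', ''): A returns '_abc_', B returns '__a__b__c__'
import Mathlib
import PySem

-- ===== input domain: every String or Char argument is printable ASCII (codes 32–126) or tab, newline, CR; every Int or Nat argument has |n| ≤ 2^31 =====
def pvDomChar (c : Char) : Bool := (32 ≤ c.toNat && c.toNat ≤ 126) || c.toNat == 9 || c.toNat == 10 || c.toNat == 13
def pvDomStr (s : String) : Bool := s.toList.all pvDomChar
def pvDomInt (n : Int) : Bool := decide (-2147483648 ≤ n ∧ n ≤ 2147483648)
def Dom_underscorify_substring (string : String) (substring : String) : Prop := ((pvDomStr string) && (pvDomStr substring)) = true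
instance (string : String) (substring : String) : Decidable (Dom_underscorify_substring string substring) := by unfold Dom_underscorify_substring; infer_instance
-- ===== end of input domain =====

-- B changes the algorithm (find-based search, one linear merge pass, slice concatenation) and is measurably faster; equivalence is claimed for non-empty substrings (Pre_).

-- ===== PORT A =====
-- tuple((start, start+len(substring)) for start in range(len(string)) if substring == string[start:start+len(substring)])
def pvAMatches (cs sub : List Char) : List (Int × Int) :=
  ((PySem.List.pyRange 0 (cs.length : Int) 1).filter
    (fun s => sub == PySem.List.slice cs (some s) (some (s + (sub.length : Int))))).map
    (fun s => (s, s + (sub.length : Int)))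

-- inner while j < len(pairs): if start' <= end: end := end'; last_used_j := j; j += 1
-- (fuel is only a totality guard: j増 by 1 each step, fuel = len(pairs)+1 is never exhausted)
def pvAInner (ps : List (Int × Int)) : Nat → Nat → Int → Option Nat → Int × Option Nat
  | 0, _, e, lj => (e, lj)
  | fuel+1, j, e, lj =>
    if h : j < ps.length then
      if (ps[j]).1 ≤ e then pvAInner ps fuel (j+1) (ps[j]).2 (some j)
      else pvAInner ps fuel (j+1) e lj
    else (e, lj)

-- outer while i < len(pairs); i advances by at least 1 each iteration, so fuel = len(pairs) is exact
def pvAOuter (fuel : Nat) (ps : List (Int × Int)) (i : Nat) (acc : List Int) : List Int :=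
  match fuel with
  | 0 => acc
  | fuel+1 =>
    if h : i < ps.length then
      let s := (ps[i]).1
      let r := pvAInner ps (ps.length + 1) (i+1) (ps[i]).2 none
      pvAOuter fuel ps (match r.2 with | none => i+1 | some j => j+1) (acc ++ [s, r.1])
    else acc

-- for i in range(len(string)): conditional '_' then string[i]; trailing '_' if u < len
def pvAEmitStep (cs : List Char) (ui : List Int) (st : Nat × List Char) (i : Nat) : Nat × List Char :=
  let (u, res) := st
  if u < ui.length && (ui.getD u 0 == (i : Int)) then (u+1, res ++ ['_', cs.getD i ' '])
  else (u, res ++ [cs.getD i ' '])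

def pvAEmit (cs : List Char) (ui : List Int) : List Char :=
  let st := (List.range cs.length).foldl (pvAEmitStep cs ui) (0, [])
  if st.1 < ui.length then st.2 ++ ['_'] else st.2

def underscorify_substring (string : String) (substring : String) : String :=
  let cs := string.toList
  let ps := pvAMatches cs substring.toList
  String.ofList (pvAEmit cs (pvAOuter ps.length ps 0 []))

-- ===== PORT B =====
-- pos = string.find(substring); while pos != -1: starts.append(pos); pos = string.find(substring, pos+1)
-- each found pos is at least 1 larger than the previous, so fuel = len(string)+1 is exact
def pvBFindLoop (cs sub : List Char) : Nat → Int → List Int → List Int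
  | 0, _, acc => acc
  | fuel+1, pos, acc =>
    if pos ≠ -1 then pvBFindLoop cs sub fuel (PySem.Chars.findFrom cs sub (pos + 1) none) (acc ++ [pos])
    else acc

def pvBStarts (cs sub : List Char) : List Int :=
  pvBFindLoop cs sub (cs.length + 1) (PySem.Chars.find cs sub) []

-- while i < n and starts[i] <= e: e = starts[i] + m; i += 1
-- (fuel is only a totality guard: i increases each step, fuel = len(starts)+1 is never exhausted)
def pvBInner (starts : List Int) (m : Int) : Nat → Nat → Int → Int × Nat
  | 0, i, e => (e, i)
  | fuel+1, i, e =>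
    if h : i < starts.length then
      if starts[i] ≤ e then pvBInner starts m fuel (i+1) (starts[i] + m)
      else (e, i)
    else (e, i)

-- outer while i < n, emitting string[prev:s] '_' string[s:e] '_'; then string[prev:]
def pvBOuter (cs : List Char) (m : Int) (starts : List Int) : Nat → Nat → Int → List Char → List Char
  | 0, _, _, out => out  -- fuel guard, never reached with fuel = len(starts)+1
  | fuel+1, i, prev, out =>
    if h : i < starts.length then
      let s := starts[i]
      let r := pvBInner starts m (starts.length + 1) (i+1) (s + m)
      pvBOuter cs m starts fuel r.2 r.1
        (out ++ PySem.List.slice cs (some prev) (some s) ++ ['_'] ++ PySem.List.slice cs (some s) (some r.1) ++ ['_'])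
    else out ++ PySem.List.slice cs (some prev) none

def underscorify_substring_alt (string : String) (substring : String) : String :=
  let cs := string.toList
  let sub := substring.toList
  String.ofList (pvBOuter cs (sub.length : Int) (pvBStarts cs sub) ((pvBStarts cs sub).length + 1) 0 0 [])

-- ===== PRECONDITION & SPEC =====
-- Pre_ excludes the empty substring: there every position "matches", a corner nobody specifies,
-- and A's single pair of outer underscores and B's underscore at every position are both accidental readings.
def Pre_underscorify_substring (string : String) (substring : String) : Prop := substring ≠ ""
instance (string : String) (substring : String) : Decidable (Pre_underscorify_substring string substring) := by unfold Pre_underscorify_substring; infer_instance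
def pvWitness_underscorify_substring : String × String := ("testthis is a testtest!", "test")

def Spec_underscorify_substring (string : String) (substring : String) (out : String) : Prop := out = underscorify_substring_alt string substring
instance (string : String) (substring : String) (out : String) : Decidable (Spec_underscorify_substring string substring out) := by unfold Spec_underscorify_substring; infer_instance

-- ===== CLAIM (what is proved, stated in full; the proofs are below) =====
def Claim_equal_underscorify_substring : Prop := ∀ (string : String) (substring : String), Dom_underscorify_substring string substring → Pre_underscorify_substring string substring → Spec_underscorify_substring string substring (underscorify_substring string substring)

-- ===== LEMMAS AND PROOFS =====


-- canonical single-pass merge used to characterise both merge loops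
def pvChain (m : Int) : List Int → Int → Int × Nat
  | [], e => (e, 0)
  | x :: xs, e =>
    if x ≤ e then ((pvChain m xs (x + m)).1, (pvChain m xs (x + m)).2 + 1)
    else (e, 0)

theorem pvChain_k_le (m : Int) (xs : List Int) (e : Int) : (pvChain m xs e).2 ≤ xs.length := by
  induction xs generalizing e with
  | nil => simp [pvChain]
  | cons x xs ih =>
    by_cases h : x ≤ e
    · have := ih (x + m)
      simp only [pvChain, if_pos h, List.length_cons]
      omega
    · simp [pvChain, h]

def pvMGo (m : Int) : Nat → List Int → List (Int × Int)
  | 0, _ => []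
  | _+1, [] => []
  | fuel+1, x :: xs =>
    (x, (pvChain m xs (x + m)).1) :: pvMGo m fuel (xs.drop (pvChain m xs (x + m)).2)

def pvMG (m : Int) (xs : List Int) : List (Int × Int) := pvMGo m xs.length xs

theorem pvMGo_fuel (m : Int) :
    ∀ (fuel fuel' : Nat) (xs : List Int), xs.length ≤ fuel → xs.length ≤ fuel' →
    pvMGo m fuel xs = pvMGo m fuel' xs := by
  intro fuel
  induction fuel with
  | zero =>
    intro fuel' xs h h'
    rw [List.length_eq_zero_iff.mp (Nat.le_zero.mp h)]
    cases fuel' <;> rfl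
  | succ fuel ih =>
    intro fuel' xs h h'
    cases xs with
    | nil => cases fuel' <;> rfl
    | cons x xs =>
      cases fuel' with
      | zero => simp at h'
      | succ fuel' =>
        simp only [pvMGo]
        congr 1
        exact ih fuel' _ (by simp at h ⊢; omega) (by simp at h' ⊢; omega)

theorem pvMG_nil (m : Int) : pvMG m [] = [] := rfl

theorem pvMG_cons (m x : Int) (xs : List Int) :
    pvMG m (x :: xs) = (x, (pvChain m xs (x + m)).1) :: pvMG m (xs.drop (pvChain m xs (x + m)).2) := by
  unfold pvMG
  simp only [List.length_cons, pvMGo]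
  congr 1
  exact pvMGo_fuel m xs.length _ _ (by simp) le_rfl

def pvFlat (I : List (Int × Int)) : List Int := I.flatMap (fun p => [p.1, p.2])

def pvIns (cs : List Char) (a : Int) : List Int → List Char
  | [] => PySem.List.slice cs (some a) none
  | l :: L => PySem.List.slice cs (some a) (some l) ++ '_' :: pvIns cs l L

def pvRender (cs : List Char) (prev : Int) : List (Int × Int) → List Char
  | [] => PySem.List.slice cs (some prev) none
  | (s, e) :: rest =>
    PySem.List.slice cs (some prev) (some s) ++ '_' :: (PySem.List.slice cs (some s) (some e) ++ '_' :: pvRender cs e rest)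

theorem pvChain_fst (m : Int) (xs : List Int) (e : Int) :
    (pvChain m xs e).1 = e ∨ ∃ y ∈ xs, (pvChain m xs e).1 = y + m := by
  induction xs generalizing e with
  | nil => simp [pvChain]
  | cons x xs ih =>
    by_cases h : x ≤ e
    · simp only [pvChain, if_pos h]
      rcases ih (x + m) with h1 | ⟨y, hy, h2⟩
      · exact Or.inr ⟨x, by simp, h1⟩
      · exact Or.inr ⟨y, by simp [hy], h2⟩
    · simp [pvChain, h]

theorem pvChain_stop (m : Int) (xs : List Int) (e : Int) (h : (pvChain m xs e).2 < xs.length) :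
    (pvChain m xs e).1 < xs[(pvChain m xs e).2] := by
  induction xs generalizing e with
  | nil => simp at h
  | cons x xs ih =>
    by_cases hx : x ≤ e
    · simp only [pvChain, if_pos hx] at h ⊢
      simpa using ih (x + m) (by simpa using h)
    · simp only [pvChain, if_neg hx]
      simpa using not_le.mp hx

theorem pvRender_eq_pvIns (cs : List Char) (I : List (Int × Int)) (prev : Int) :
    pvRender cs prev I = pvIns cs prev (pvFlat I) := by
  induction I generalizing prev with
  | nil => rfl
  | cons p rest ih => cases p; simp [pvRender, pvFlat, pvIns, ih]

-- ===== B-side characterisation =====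
theorem pvBInner_eq (starts : List Int) (m : Int) :
    ∀ (fuel i : Nat) (e : Int), starts.length - i < fuel →
    pvBInner starts m fuel i e = ((pvChain m (starts.drop i) e).1, i + (pvChain m (starts.drop i) e).2) := by
  intro fuel
  induction fuel with
  | zero => intro i e h; omega
  | succ fuel ih =>
    intro i e h
    by_cases hi : i < starts.length
    · rw [pvBInner, dif_pos hi]
      rw [show starts.drop i = starts[i] :: starts.drop (i+1) from (List.getElem_cons_drop hi).symm]
      by_cases hle : starts[i] ≤ e
      · rw [if_pos hle, ih (i+1) _ (by omega)]
        simp only [pvChain, if_pos hle, Prod.mk.injEq]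
        exact ⟨by trivial, by omega⟩
      · rw [if_neg hle]
        simp [pvChain, hle]
    · rw [pvBInner, dif_neg hi, List.drop_of_length_le (by omega)]
      simp [pvChain]

theorem pvBOuter_eq (cs : List Char) (m : Int) (starts : List Int) :
    ∀ (fuel i : Nat) (prev : Int) (out : List Char), starts.length - i < fuel →
    pvBOuter cs m starts fuel i prev out = out ++ pvRender cs prev (pvMG m (starts.drop i)) := by
  intro fuel
  induction fuel with
  | zero => intro i prev out h; omega
  | succ fuel ih =>
    intro i prev out h
    rw [pvBOuter]
    by_cases hi : i < starts.length
    · rw [dif_pos hi]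
      simp only [pvBInner_eq starts m (starts.length + 1) (i+1) _ (by omega)]
      rw [ih _ _ _ (by omega)]
      rw [show starts.drop i = starts[i] :: starts.drop (i+1) from (List.getElem_cons_drop hi).symm]
      rw [pvMG_cons]
      simp only [pvRender, List.drop_drop]
      simp [List.append_assoc]
    · rw [dif_neg hi, List.drop_of_length_le (by omega), pvMG_nil]
      rfl

-- ===== A-side characterisation =====
theorem pvAInner_frozen (ps : List (Int × Int)) :
    ∀ (fuel j : Nat) (e : Int) (lj : Option Nat), (∀ p ∈ ps.drop j, e < p.1) →
    pvAInner ps fuel j e lj = (e, lj) := by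
  intro fuel
  induction fuel with
  | zero => intro j e lj _; rfl
  | succ fuel ih =>
    intro j e lj hfr
    by_cases hj : j < ps.length
    · rw [pvAInner, dif_pos hj]
      have hmem : ps[j] ∈ ps.drop j := by
        rw [show ps.drop j = ps[j] :: ps.drop (j+1) from (List.getElem_cons_drop hj).symm]
        exact List.mem_cons_self
      rw [if_neg (not_le.mpr (hfr _ hmem))]
      apply ih
      intro p hp
      apply hfr
      rw [show ps.drop j = ps[j] :: ps.drop (j+1) from (List.getElem_cons_drop hj).symm]
      exact List.mem_cons_of_mem _ hp
    · rw [pvAInner, dif_neg hj]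

theorem pvAInner_eq (starts : List Int) (m : Int) (hs : starts.Pairwise (· < ·)) :
    ∀ (fuel j : Nat) (e : Int) (lj : Option Nat), starts.length - j < fuel →
    pvAInner (starts.map (fun x => (x, x + m))) fuel j e lj =
      ((pvChain m (starts.drop j) e).1,
       match (pvChain m (starts.drop j) e).2 with
       | 0 => lj
       | Nat.succ kk => some (j + kk)) := by
  intro fuel
  induction fuel with
  | zero => intro j e lj h; omega
  | succ fuel ih =>
    intro j e lj h
    by_cases hj : j < starts.length
    · have hj' : j < (starts.map (fun x => (x, x + m))).length := by simpa using hj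
      have hgj : (starts.map (fun x => (x, x + m)))[j] = (starts[j], starts[j] + m) := by simp
      rw [pvAInner, dif_pos hj', hgj]
      rw [show starts.drop j = starts[j] :: starts.drop (j+1) from (List.getElem_cons_drop hj).symm]
      by_cases hle : starts[j] ≤ e
      · rw [if_pos hle]
        rw [ih (j+1) (starts[j] + m) (some j) (by omega)]
        simp only [pvChain, if_pos hle]
        cases hc : (pvChain m (starts.drop (j+1)) (starts[j] + m)).2 with
        | zero => simp
        | succ kk =>
          simp only [Prod.mk.injEq, Option.some.injEq]
          exact ⟨by trivial, by omega⟩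
      · rw [if_neg hle]
        have hdp : (starts.drop j).Pairwise (· < ·) := hs.sublist (List.drop_sublist j starts)
        rw [show starts.drop j = starts[j] :: starts.drop (j+1) from (List.getElem_cons_drop hj).symm,
            List.pairwise_cons] at hdp
        rw [pvAInner_frozen]
        · simp [pvChain, hle]
        · intro p hp
          rw [show (starts.map (fun x => (x, x + m))).drop (j+1) = (starts.drop (j+1)).map (fun x => (x, x + m)) from by
                simp] at hp
          rcases List.mem_map.mp hp with ⟨y, hy, rfl⟩
          have := hdp.1 y hy
          simp only
          omega
    · rw [pvAInner, dif_neg (by simp; omega), List.drop_of_length_le (by omega)]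
      simp [pvChain]

theorem pvAOuter_eq (starts : List Int) (m : Int) (hs : starts.Pairwise (· < ·)) :
    ∀ (fuel i : Nat) (acc : List Int), starts.length - i ≤ fuel →
    pvAOuter fuel (starts.map (fun x => (x, x + m))) i acc = acc ++ pvFlat (pvMG m (starts.drop i)) := by
  intro fuel
  induction fuel with
  | zero =>
    intro i acc h
    rw [List.drop_of_length_le (by omega), pvMG_nil]
    simp [pvAOuter, pvFlat]
  | succ fuel ih =>
    intro i acc h
    by_cases hi : i < starts.length
    · have hi' : i < (starts.map (fun x => (x, x + m))).length := by simpa using hi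
      have hgi : (starts.map (fun x => (x, x + m)))[i] = (starts[i], starts[i] + m) := by simp
      rw [pvAOuter, dif_pos hi', hgi]
      rw [pvAInner_eq starts m hs ((starts.map (fun x => (x, x + m))).length + 1) (i+1) (starts[i] + m) none (by rw [List.length_map]; omega)]
      have hnext : (match (match (pvChain m (starts.drop (i+1)) (starts[i] + m)).2 with
                    | 0 => (none : Option Nat)
                    | Nat.succ kk => some (i + 1 + kk)) with
                    | none => i + 1
                    | some j => j + 1) = i + 1 + (pvChain m (starts.drop (i+1)) (starts[i] + m)).2 := by
        cases hc : (pvChain m (starts.drop (i+1)) (starts[i] + m)).2 with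
        | zero => show i + 1 = i + 1 + 0; omega
        | succ kk => show i + 1 + kk + 1 = i + 1 + (kk + 1); omega
      simp only [hnext]
      rw [ih (i + 1 + (pvChain m (starts.drop (i+1)) (starts[i] + m)).2) _ (by omega)]
      rw [show starts.drop i = starts[i] :: starts.drop (i+1) from (List.getElem_cons_drop hi).symm]
      rw [pvMG_cons]
      simp only [pvFlat, List.flatMap_cons, List.drop_drop]
      simp [List.append_assoc]
    · rw [pvAOuter, dif_neg (by simp; omega), List.drop_of_length_le (by omega), pvMG_nil]
      simp [pvFlat]

-- ===== occurrence lists =====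

def pvOcc (cs sub : List Char) : List Nat :=
  (List.range cs.length).filter (fun i => decide (sub <+: cs.drop i))

theorem pvOcc_pairwise (cs sub : List Char) : (pvOcc cs sub).Pairwise (· < ·) :=
  List.pairwise_lt_range.sublist List.filter_sublist

theorem pvOcc_mem (cs sub : List Char) (i : Nat) :
    i ∈ pvOcc cs sub ↔ i < cs.length ∧ sub <+: cs.drop i := by
  simp [pvOcc]

theorem pvOcc_bound (cs sub : List Char) (i : Nat) (h : i ∈ pvOcc cs sub) :
    i + sub.length ≤ cs.length := by
  rcases (pvOcc_mem cs sub i).mp h with ⟨h1, hp⟩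
  have h2 := hp.length_le
  rw [List.length_drop] at h2
  omega

theorem pvAMatches_eq (cs sub : List Char) :
    pvAMatches cs sub = (pvOcc cs sub).map (fun (i : Nat) => ((i : Int), (i : Int) + (sub.length : Int))) := by
  have hfil : (List.range cs.length).filter
        ((fun s => sub == PySem.List.slice cs (some s) (some (s + (sub.length : Int)))) ∘ (fun k : Nat => (k : Int)))
      = pvOcc cs sub := by
    unfold pvOcc
    apply List.filter_congr
    intro i _
    simp only [Function.comp_apply]
    rw [PySem.List.slice_natCast_add]
    by_cases hp : sub <+: cs.drop i
    · rw [← List.prefix_iff_eq_take.mp hp]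
      simp [hp]
    · simp only [hp, decide_false, beq_eq_false_iff_ne, ne_eq]
      exact fun he => hp (List.prefix_iff_eq_take.mpr he)
  unfold pvAMatches
  rw [PySem.List.pyRange_zero_natCast, List.filter_map, hfil, List.map_map]
  simp [Function.comp_def]

theorem pvFilter_sorted_cons (l : List Nat) (hs : l.Pairwise (· < ·)) (s k : Nat)
    (hmem : s ∈ l) (hks : k ≤ s) (hmin : ∀ i ∈ l, k ≤ i → s ≤ i) :
    l.filter (fun i => decide (k ≤ i)) = s :: l.filter (fun i => decide (s + 1 ≤ i)) := by
  induction l with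
  | nil => simp at hmem
  | cons a l ih =>
    rw [List.pairwise_cons] at hs
    rcases List.mem_cons.mp hmem with rfl | hmem'
    · rw [List.filter_cons_of_pos (by simpa using hks), List.filter_cons_of_neg (by simp)]
      congr 1
      apply List.filter_congr
      intro i hi
      have h1 := hs.1 i hi
      simp only [decide_eq_decide]
      omega
    · have has : a < s := hs.1 s hmem'
      have hka : ¬ k ≤ a := fun hka => by have := hmin a List.mem_cons_self hka; omega
      rw [List.filter_cons_of_neg (by simpa using hka), List.filter_cons_of_neg (by simp; omega)]
      exact ih hs.2 hmem' (fun i hi hki => hmin i (List.mem_cons_of_mem _ hi) hki)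

theorem pvBFindLoop_eq (cs sub : List Char) (hsub : sub ≠ []) :
    ∀ (fuel k : Nat) (acc : List Int), k ≤ cs.length → cs.length + 1 - k ≤ fuel →
    pvBFindLoop cs sub fuel (PySem.Chars.findFrom cs sub (k : Int) none) acc
      = acc ++ ((pvOcc cs sub).filter (fun i => decide (k ≤ i))).map (fun (i : Nat) => (i : Int)) := by
  intro fuel
  induction fuel with
  | zero => intro k acc hk hf; omega
  | succ fuel ih =>
    intro k acc hk hf
    by_cases hp : PySem.Chars.findFrom cs sub (k : Int) none = -1
    · have hni : ¬ sub <:+: cs.drop k := (PySem.Chars.findFrom_natCast_eq_neg_one_iff cs sub k hk).mp hp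
      have hempty : (pvOcc cs sub).filter (fun i => decide (k ≤ i)) = [] := by
        rw [List.filter_eq_nil_iff]
        intro i hi hki
        rcases (pvOcc_mem cs sub i).mp hi with ⟨-, hpre⟩
        apply hni
        have hki' : k ≤ i := by simpa using hki
        have hdd : cs.drop i = (cs.drop k).drop (i - k) := by
          rw [List.drop_drop]
          congr 1
          omega
        rw [hdd] at hpre
        exact hpre.isInfix.trans (List.drop_suffix _ _).isInfix
      rw [hempty]
      simp only [pvBFindLoop, hp]
      simp
    · obtain ⟨h1, h2, h3⟩ := PySem.Chars.findFrom_natCast_spec cs sub k hk hp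
      have hp0 : (0 : Int) ≤ PySem.Chars.findFrom cs sub (k : Int) none :=
        le_trans (by exact_mod_cast Int.natCast_nonneg k) h1
      have hps : PySem.Chars.findFrom cs sub (k : Int) none
          = ((PySem.Chars.findFrom cs sub (k : Int) none).toNat : Int) := (Int.toNat_of_nonneg hp0).symm
      have hlen := h2.length_le
      rw [List.length_drop] at hlen
      have hlen1 : 1 ≤ sub.length := List.length_pos_iff.mpr hsub
      have hsn : (PySem.Chars.findFrom cs sub (k : Int) none).toNat < cs.length := by omega
      have hks : k ≤ (PySem.Chars.findFrom cs sub (k : Int) none).toNat := by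
        have : (k : Int) ≤ ((PySem.Chars.findFrom cs sub (k : Int) none).toNat : Int) := by
          rw [← hps]; exact h1
        exact_mod_cast this
      have hmem : (PySem.Chars.findFrom cs sub (k : Int) none).toNat ∈ pvOcc cs sub :=
        (pvOcc_mem cs sub _).mpr ⟨hsn, h2⟩
      have hmin : ∀ i ∈ pvOcc cs sub, k ≤ i → (PySem.Chars.findFrom cs sub (k : Int) none).toNat ≤ i := by
        intro i hi hki
        rcases (pvOcc_mem cs sub i).mp hi with ⟨-, hpre⟩
        by_contra hlt
        exact h3 i hki (by omega) hpre
      simp only [pvBFindLoop, if_pos hp]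
      rw [hps, show (((PySem.Chars.findFrom cs sub (k : Int) none).toNat : Int) + 1)
            = (((PySem.Chars.findFrom cs sub (k : Int) none).toNat + 1 : Nat) : Int) by push_cast; ring]
      rw [ih ((PySem.Chars.findFrom cs sub (k : Int) none).toNat + 1) _ (by omega) (by omega)]
      rw [pvFilter_sorted_cons (pvOcc cs sub) (pvOcc_pairwise cs sub) _ k hmem hks hmin]
      simp

theorem pvBStarts_eq (cs sub : List Char) (hsub : sub ≠ []) :
    pvBStarts cs sub = (pvOcc cs sub).map (fun (i : Nat) => (i : Int)) := by
  unfold pvBStarts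
  rw [← PySem.Chars.findFrom_zero, show (0 : Int) = ((0 : Nat) : Int) by simp]
  rw [pvBFindLoop_eq cs sub hsub (cs.length + 1) 0 [] (by omega) (by omega)]
  simp

-- ===== interval invariants =====
theorem pvMG_flat_vals (m : Int) :
    ∀ (n : Nat) (xs : List Int), xs.length ≤ n →
    ∀ v ∈ pvFlat (pvMG m xs), ∃ y ∈ xs, v = y ∨ v = y + m := by
  intro n
  induction n with
  | zero =>
    intro xs hn
    rw [List.length_eq_zero_iff.mp (Nat.le_zero.mp hn), pvMG_nil]
    simp [pvFlat]
  | succ n ih =>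
    intro xs hn v hv
    cases xs with
    | nil =>
      rw [pvMG_nil] at hv
      simp [pvFlat] at hv
    | cons x rest =>
      rw [pvMG_cons] at hv
      simp only [pvFlat, List.flatMap_cons, List.cons_append, List.nil_append, List.mem_cons] at hv
      rcases hv with rfl | rfl | hv
      · exact ⟨v, by simp, Or.inl rfl⟩
      · rcases pvChain_fst m rest (x + m) with h1 | ⟨y, hy, h2⟩
        · exact ⟨x, by simp, Or.inr h1⟩
        · exact ⟨y, by simp [hy], Or.inr h2⟩
      · rcases ih (rest.drop (pvChain m rest (x + m)).2) (by simp at hn ⊢; omega) v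
            (by simpa [pvFlat] using hv) with ⟨y, hy, h2⟩
        exact ⟨y, by simp [List.mem_of_mem_drop hy], h2⟩

theorem pvSortedDropLe (l : List Int) (hs : l.Pairwise (· < ·)) (k : Nat) (hk : k < l.length) :
    ∀ y ∈ l.drop k, l[k] ≤ y := by
  intro y hy
  have hp : (l.drop k).Pairwise (· < ·) := hs.sublist (List.drop_sublist k l)
  rw [show l.drop k = l[k] :: l.drop (k+1) from (List.getElem_cons_drop hk).symm] at hy hp
  rcases List.mem_cons.mp hy with rfl | hy
  · exact le_refl _
  · exact le_of_lt ((List.pairwise_cons.mp hp).1 y hy)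

theorem pvMG_flat_inv (m N : Int) (hm : 1 ≤ m) :
    ∀ (n : Nat) (xs : List Int), xs.length ≤ n → xs.Pairwise (· < ·) → (∀ x ∈ xs, 0 ≤ x ∧ x + m ≤ N) →
    (pvFlat (pvMG m xs)).Pairwise (· < ·) ∧ (∀ v ∈ pvFlat (pvMG m xs), 0 ≤ v ∧ v ≤ N) := by
  intro n
  induction n with
  | zero =>
    intro xs hn _ _
    rw [List.length_eq_zero_iff.mp (Nat.le_zero.mp hn), pvMG_nil]
    simp [pvFlat]
  | succ n ih =>
    intro xs hn hs hb
    cases xs with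
    | nil => simp [pvFlat, pvMG_nil]
    | cons x rest =>
      rw [List.pairwise_cons] at hs
      have hchk := pvChain_k_le m rest (x + m)
      have hbx := hb x (by simp)
      -- tail list for the recursion
      have htl : (rest.drop (pvChain m rest (x + m)).2).Pairwise (· < ·) :=
        hs.2.sublist (List.drop_sublist _ rest)
      have htb : ∀ y ∈ rest.drop (pvChain m rest (x + m)).2, 0 ≤ y ∧ y + m ≤ N :=
        fun y hy => hb y (by simp [List.mem_of_mem_drop hy])
      have hrec := ih (rest.drop (pvChain m rest (x + m)).2) (by simp at hn ⊢; omega) htl htb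
      -- head interval facts
      have hc1lo : x + m ≤ (pvChain m rest (x + m)).1 := by
        rcases pvChain_fst m rest (x + m) with h1 | ⟨y, hy, h2⟩
        · omega
        · have := hs.1 y hy
          omega
      have hc1hi : (pvChain m rest (x + m)).1 ≤ N := by
        rcases pvChain_fst m rest (x + m) with h1 | ⟨y, hy, h2⟩
        · omega
        · have := hb y (by simp [hy])
          omega
      -- everything in the recursive flat list lies above the head interval end
      have hgap : ∀ v ∈ pvFlat (pvMG m (rest.drop (pvChain m rest (x + m)).2)), (pvChain m rest (x + m)).1 < v := by
        intro v hv
        rcases pvMG_flat_vals m (rest.drop (pvChain m rest (x + m)).2).length _ le_rfl v hv with ⟨y, hy, h2⟩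
        by_cases hfull : (pvChain m rest (x + m)).2 < rest.length
        · have hstop := pvChain_stop m rest (x + m) hfull
          have hylo : rest[(pvChain m rest (x + m)).2] ≤ y :=
            pvSortedDropLe rest hs.2 (pvChain m rest (x + m)).2 hfull y hy
          rcases h2 with rfl | rfl <;> omega
        · rw [List.drop_of_length_le (by omega)] at hy
          simp at hy
      rw [pvMG_cons]
      simp only [pvFlat, List.flatMap_cons] at hrec ⊢
      constructor
      · rw [List.pairwise_append]
        refine ⟨?_, hrec.1, ?_⟩
        · have hx1 : x < (pvChain m rest (x + m)).1 := by omega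
          simp [List.pairwise_cons, hx1]
        · intro v hv w hw
          have hgw := hgap w (by simpa [pvFlat] using hw)
          simp only [List.mem_cons, List.not_mem_nil, or_false] at hv
          rcases hv with rfl | rfl <;> omega
      · intro v hv
        simp only [List.cons_append, List.nil_append, List.mem_cons] at hv
        rcases hv with rfl | rfl | hv
        · omega
        · omega
        · exact hrec.2 v hv

-- ===== emission =====
theorem pvEmit_nomatch (cs : List Char) (ui : List Int) :
    ∀ (b a : Nat) (u : Nat) (res : List Char), a + b ≤ cs.length →
    (∀ i : Nat, a ≤ i → i < a + b → ¬(u < ui.length ∧ ui.getD u 0 = (i : Int))) →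
    (List.range' a b).foldl (pvAEmitStep cs ui) (u, res) = (u, res ++ (cs.drop a).take b) := by
  intro b
  induction b with
  | zero => intro a u res _ _; simp
  | succ b ih =>
    intro a u res hab hno
    rw [List.range'_succ]
    simp only [List.foldl_cons]
    have hcond : (decide (u < ui.length) && (ui.getD u 0 == (a : Int))) = false := by
      by_cases hu : u < ui.length
      · simp only [hu, decide_true, Bool.true_and, beq_eq_false_iff_ne, ne_eq]
        exact fun hc => hno a le_rfl (by omega) ⟨hu, hc⟩
      · simp [hu]
    have hstep : pvAEmitStep cs ui (u, res) a = (u, res ++ [cs.getD a ' ']) := by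
      simp only [pvAEmitStep, hcond]
      rfl
    rw [hstep, ih (a+1) u _ (by omega) (fun i h1 h2 => hno i (by omega) (by omega))]
    have ha : a < cs.length := by omega
    have htk : List.take (b+1) (cs.drop a) = cs[a] :: List.take b (cs.drop (a+1)) := by
      rw [show cs.drop a = cs[a] :: cs.drop (a+1) from (List.getElem_cons_drop ha).symm]
      rfl
    rw [htk, List.getD_eq_getElem cs ' ' ha]
    simp

theorem pvIns_step (cs : List Char) (s : Nat) (L : List Int) (hs : s < cs.length)
    (hL : ∀ l ∈ L, (s : Int) < l) :
    pvIns cs (s : Int) L = cs.getD s ' ' :: pvIns cs ((s : Int) + 1) L := by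
  have hcast : ((s : Int) + 1) = ((s + 1 : Nat) : Int) := by push_cast; ring
  cases L with
  | nil =>
    simp only [pvIns]
    rw [PySem.List.slice_from_natCast, hcast, PySem.List.slice_from_natCast]
    rw [show cs.drop s = cs[s] :: cs.drop (s+1) from (List.getElem_cons_drop hs).symm]
    rw [List.getD_eq_getElem cs ' ' hs]
  | cons l L' =>
    have h0 : (s : Int) < l := hL l (by simp)
    have hst : s < l.toNat := by omega
    have hslice : PySem.List.slice cs (some (s : Int)) (some l)
        = cs.getD s ' ' :: PySem.List.slice cs (some ((s : Int) + 1)) (some l) := by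
      rw [show l = ((l.toNat : Nat) : Int) from (Int.toNat_of_nonneg (by omega)).symm, hcast,
          PySem.List.slice_natCast, PySem.List.slice_natCast,
          show l.toNat - s = (l.toNat - (s+1)) + 1 by omega,
          show cs.drop s = cs[s] :: cs.drop (s+1) from (List.getElem_cons_drop hs).symm,
          List.getD_eq_getElem cs ' ' hs]
      rfl
    simp only [pvIns, hslice]
    simp

theorem pvEmit_main (cs : List Char) (ui : List Int) :
    ∀ (L : List Int) (a u : Nat) (res : List Char),
    ui.drop u = L → L.Pairwise (· < ·) →
    (∀ l ∈ L, (a : Int) ≤ l ∧ l ≤ (cs.length : Int)) → a ≤ cs.length →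
    (let st := (List.range' a (cs.length - a)).foldl (pvAEmitStep cs ui) (u, res);
     if st.1 < ui.length then st.2 ++ ['_'] else st.2) = res ++ pvIns cs (a : Int) L := by
  intro L
  induction L with
  | nil =>
    intro a u res hdrop _ _ ha
    have hu : ui.length ≤ u := by
      have h := congrArg List.length hdrop
      rw [List.length_drop] at h
      simp at h
      omega
    rw [pvEmit_nomatch cs ui (cs.length - a) a u res (by omega) (fun i h1 h2 hc => absurd hc.1 (by omega))]
    simp only [pvIns]
    rw [if_neg (Nat.not_lt.mpr hu), List.take_of_length_le (by simp), PySem.List.slice_from_natCast]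
  | cons l L' ih =>
    intro a u res hdrop hpw hbnd ha
    have hulen : u < ui.length := by
      by_contra hge
      rw [List.drop_of_length_le (by omega)] at hdrop
      exact absurd hdrop.symm (List.cons_ne_nil _ _)
    have hget : ui[u] = l ∧ ui.drop (u+1) = L' := by
      have hh := List.drop_eq_getElem_cons hulen
      rw [hdrop] at hh
      exact ⟨(List.cons.injEq _ _ _ _ ▸ hh).1.symm, ((List.cons.injEq _ _ _ _ ▸ hh).2).symm⟩
    have hgd : ui.getD u 0 = l := by
      rw [List.getD_eq_getElem ui 0 hulen]
      exact hget.1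
    obtain ⟨hbl1, hbl2⟩ := hbnd l (by simp)
    have hl0 : (0 : Int) ≤ l := le_trans (by exact_mod_cast Int.natCast_nonneg a) hbl1
    have hlcast : l = ((l.toNat : Nat) : Int) := (Int.toNat_of_nonneg hl0).symm
    have has : a ≤ l.toNat := by omega
    have hsn' : l.toNat ≤ cs.length := by omega
    rw [List.pairwise_cons] at hpw
    have hsplit : List.range' a (cs.length - a)
        = List.range' a (l.toNat - a) ++ List.range' l.toNat (cs.length - l.toNat) := by
      rw [show cs.length - a = (l.toNat - a) + (cs.length - l.toNat) by omega, ← List.range'_append,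
          show a + 1 * (l.toNat - a) = l.toNat by omega]
    rw [hsplit, List.foldl_append]
    rw [pvEmit_nomatch cs ui (l.toNat - a) a u res (by omega)
        (fun i h1 h2 hc => by
          rw [hgd] at hc
          have hc2 : l = (i : Int) := hc.2
          omega)]
    by_cases hlt : l.toNat < cs.length
    · rw [show cs.length - l.toNat = (cs.length - (l.toNat + 1)) + 1 by omega, List.range'_succ]
      simp only [List.foldl_cons]
      have hstep : pvAEmitStep cs ui (u, res ++ (cs.drop a).take (l.toNat - a)) l.toNat
          = (u + 1, (res ++ (cs.drop a).take (l.toNat - a)) ++ ['_', cs.getD l.toNat ' ']) := by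
        simp only [pvAEmitStep, hgd, hulen, decide_true, Bool.true_and]
        rw [← hlcast]
        simp
      rw [hstep]
      rw [ih (l.toNat + 1) (u + 1) _ hget.2 hpw.2
          (fun l' hl' => ⟨by have := hpw.1 l' hl'; push_cast; omega, (hbnd l' (List.mem_cons_of_mem _ hl')).2⟩)
          (by omega)]
      simp only [pvIns]
      have hsl : PySem.List.slice cs (some (a : Int)) (some l) = (cs.drop a).take (l.toNat - a) := by
        conv_lhs => rw [hlcast]
        rw [PySem.List.slice_natCast]
      have hpvins : pvIns cs l L' = cs.getD l.toNat ' ' :: pvIns cs (((l.toNat + 1 : Nat) : Int)) L' := by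
        conv_lhs => rw [hlcast]
        rw [pvIns_step cs l.toNat L' hlt (fun l' hl' => by rw [← hlcast]; exact hpw.1 l' hl')]
        rw [show ((l.toNat : Nat) : Int) + 1 = ((l.toNat + 1 : Nat) : Int) by push_cast; ring]
      rw [hsl, hpvins]
      simp
    · have hseq : l.toNat = cs.length := by omega
      have hL' : L' = [] := by
        cases L' with
        | nil => rfl
        | cons w W =>
          have h1 := hpw.1 w (by simp)
          have h2 := (hbnd w (by simp)).2
          omega
      subst hL'
      rw [show cs.length - l.toNat = 0 by omega]
      simp only [List.range'_zero, List.foldl_nil]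
      rw [if_pos (show u < ui.length from hulen)]
      simp only [pvIns]
      have hsl : PySem.List.slice cs (some (a : Int)) (some l) = (cs.drop a).take (l.toNat - a) := by
        conv_lhs => rw [hlcast]
        rw [PySem.List.slice_natCast]
      rw [hsl, show PySem.List.slice cs (some l) none = ([] : List Char) from by
            rw [hlcast, PySem.List.slice_from_natCast, hseq, List.drop_length]]
      simp

theorem pvAEmit_eq (cs : List Char) (ui : List Int)
    (h1 : ui.Pairwise (· < ·)) (h2 : ∀ l ∈ ui, 0 ≤ l ∧ l ≤ (cs.length : Int)) :
    pvAEmit cs ui = pvIns cs 0 ui := by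
  have h := pvEmit_main cs ui ui 0 0 [] (by simp) h1 (by simpa using h2) (by omega)
  simpa [pvAEmit, List.range_eq_range'] using h

-- ===== final assembly =====
theorem pvMain_eq (string substring : String) (hsub : substring ≠ "") :
    underscorify_substring string substring = underscorify_substring_alt string substring := by
  have hsubl : substring.toList ≠ [] := by
    intro h
    apply hsub
    have h2 := congrArg String.ofList h
    simpa using h2
  have hm1 : (1 : Int) ≤ (substring.toList.length : Int) := by
    have := List.length_pos_iff.mpr hsubl
    exact_mod_cast this
  simp only [underscorify_substring, underscorify_substring_alt]
  have hsorted : ((pvOcc string.toList substring.toList).map (fun (i : Nat) => (i : Int))).Pairwise (· < ·) :=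
    List.Pairwise.map _ (fun a b h => by exact_mod_cast h) (pvOcc_pairwise string.toList substring.toList)
  have hbounds : ∀ x ∈ (pvOcc string.toList substring.toList).map (fun (i : Nat) => (i : Int)),
      0 ≤ x ∧ x + (substring.toList.length : Int) ≤ (string.toList.length : Int) := by
    intro x hx
    rcases List.mem_map.mp hx with ⟨i, hi, rfl⟩
    have := pvOcc_bound string.toList substring.toList i hi
    refine ⟨by exact_mod_cast Int.natCast_nonneg i, ?_⟩
    omega
  have hinv := pvMG_flat_inv (substring.toList.length : Int) (string.toList.length : Int) hm1
      ((pvOcc string.toList substring.toList).map (fun (i : Nat) => (i : Int))).length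
      ((pvOcc string.toList substring.toList).map (fun (i : Nat) => (i : Int))) le_rfl hsorted hbounds
  rw [pvAMatches_eq]
  rw [show (pvOcc string.toList substring.toList).map
        (fun (i : Nat) => ((i : Int), (i : Int) + (substring.toList.length : Int)))
      = ((pvOcc string.toList substring.toList).map (fun (i : Nat) => (i : Int))).map
          (fun x => (x, x + (substring.toList.length : Int))) from by
        rw [List.map_map]
        simp [Function.comp_def]]
  rw [pvAOuter_eq ((pvOcc string.toList substring.toList).map (fun (i : Nat) => (i : Int)))
      (substring.toList.length : Int) hsorted _ 0 [] (by simp)]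
  simp only [List.drop_zero, List.nil_append]
  rw [pvAEmit_eq string.toList _ hinv.1 hinv.2]
  rw [pvBStarts_eq string.toList substring.toList hsubl]
  rw [pvBOuter_eq string.toList (substring.toList.length : Int)
      ((pvOcc string.toList substring.toList).map (fun (i : Nat) => (i : Int)))
      (((pvOcc string.toList substring.toList).map (fun (i : Nat) => (i : Int))).length + 1) 0 0 [] (by omega)]
  simp only [List.drop_zero, List.nil_append]
  rw [pvRender_eq_pvIns]

-- ===== VERDICT (by name: the statement is the Claim_ definition above) =====
theorem underscorify_substring_spec : Claim_equal_underscorify_substring := by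
  intro string substring hdom hpre
  unfold Spec_underscorify_substring
  exact pvMain_eq string substring hpre
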